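-- pv_equiv track=rewrite | github.com/StarkPrince/ONLINE_JUDGES | D_AND_and_SUM.py | possiblePair
-- ===== SOURCE A (Python) =====
-- MaxBit = 90
--
-- def possiblePair(and_, sum_):
--     or_ = sum_ - and_
--     if (or_ < 0):
--         return False
--
--     for k in range(MaxBit):
--         bit1 = (or_ >> k)
--         bit2 = (and_ >> k)
--         if (bit1 == 1 and bit2 == 1):
--             return False
--     return True
-- ===== SOURCE B (Python) =====
-- def possiblePair(and_, sum_):
--     or_ = sum_ - and_
--     if or_ < 0:
--         return False
--     return not (or_ > 0 and and_ > 0 and or_.bit_length() == and_.bit_length())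
-- ===== Notes on version B (the rewrite author's own statement) =====
-- stated objective: simpler
-- what changed: Replaces the 90-iteration shift loop with a direct bit_length comparison: the loop finds a k with or_>>k == and_>>k == 1, which for positive numbers exists iff the two bit lengths coincide (within the 2^31 domain the MaxBit cap is never reached).
import Mathlib
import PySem

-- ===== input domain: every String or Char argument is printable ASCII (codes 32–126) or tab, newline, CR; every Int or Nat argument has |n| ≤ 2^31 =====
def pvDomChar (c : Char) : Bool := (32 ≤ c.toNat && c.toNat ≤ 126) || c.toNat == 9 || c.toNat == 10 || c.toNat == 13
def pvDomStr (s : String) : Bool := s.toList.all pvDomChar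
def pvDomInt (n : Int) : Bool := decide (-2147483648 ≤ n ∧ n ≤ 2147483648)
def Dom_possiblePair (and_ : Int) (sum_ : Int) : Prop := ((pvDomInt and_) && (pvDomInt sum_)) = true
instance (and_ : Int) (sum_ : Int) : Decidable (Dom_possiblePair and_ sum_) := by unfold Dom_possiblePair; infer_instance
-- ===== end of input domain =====

-- B replaces A's 90-iteration shift loop by a direct bit_length comparison (a closed form for the
-- loop's search); within the given |n| ≤ 2^31 domain the MaxBit cap of A is never the deciding factor.

-- ===== PORT A =====
def MaxBit : Nat := 90

def possiblePair (and_ : Int) (sum_ : Int) : Bool :=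
  let or_ := sum_ - and_
  if or_ < 0 then false
  else
    -- for k in range(MaxBit): if or_>>k == 1 and and_>>k == 1: return False  / return True
    if (List.range MaxBit).any (fun k => (or_ >>> k == 1) && (and_ >>> k == 1)) then false
    else true

-- ===== PORT B =====
def possiblePair_alt (and_ : Int) (sum_ : Int) : Bool :=
  let or_ := sum_ - and_
  if or_ < 0 then false
  else
    !(decide (or_ > 0) && decide (and_ > 0) &&
      (PySem.Int.bitLength or_ == PySem.Int.bitLength and_))

-- ===== PRECONDITION & SPEC =====
def Spec_possiblePair (and_ : Int) (sum_ : Int) (out : Bool) : Prop := out = possiblePair_alt and_ sum_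
instance (and_ : Int) (sum_ : Int) (out : Bool) : Decidable (Spec_possiblePair and_ sum_ out) := by unfold Spec_possiblePair; infer_instance

-- ===== CLAIM (what is proved, stated in full; the proofs are below) =====
def Claim_equal_possiblePair : Prop := ∀ (and_ : Int) (sum_ : Int), Dom_possiblePair and_ sum_ → Spec_possiblePair and_ sum_ (possiblePair and_ sum_)

-- ===== LEMMAS AND PROOFS =====

-- a nonpositive number arithmetic-shifted right is never 1
theorem shr_nonpos (x : Int) (k : Nat) (h : x ≤ 0) : x >>> k ≠ 1 := by
  rw [Int.shiftRight_eq_div_pow]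
  intro hc
  have h2 : (0:Int) < ((2^k : Nat) : Int) := by positivity
  have h3 : x / ((2^k : Nat) : Int) ≤ 0 := Int.ediv_nonpos_of_nonpos_of_neg h h2
  omega

-- x >> k = 1 exactly on the dyadic bracket 2^k ≤ x < 2^(k+1)
theorem shr_eq_one_bracket (x : Int) (k : Nat) : x >>> k = 1 ↔ (2^k ≤ x ∧ x < 2^(k+1)) := by
  rw [Int.shiftRight_eq_div_pow]
  have h2 : (0:Int) < ((2^k : Nat) : Int) := by positivity
  constructor
  · intro hc
    have ha := Int.le_ediv_iff_mul_le h2 (a := 1) (b := x)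
    have hb := Int.ediv_lt_iff_lt_mul h2 (a := x) (b := 2)
    push_cast at *
    refine ⟨by have := ha.mp (by omega); linarith, ?_⟩
    have := hb.mp (by omega); rw [pow_succ]; linarith
  · rintro ⟨hl, hr⟩
    have ha := (Int.le_ediv_iff_mul_le h2 (a := 1) (b := x)).mpr (by push_cast; linarith)
    have hb := (Int.ediv_lt_iff_lt_mul h2 (a := x) (b := 2)).mpr
      (by push_cast; rw [pow_succ] at hr; linarith)
    omega

-- for positive x, the bit length brackets x between consecutive powers of two
theorem bitLen_bracket (x : Int) (hx : 0 < x) :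
    1 ≤ PySem.Int.bitLength x ∧ 2^(PySem.Int.bitLength x - 1) ≤ x ∧ x < 2^(PySem.Int.bitLength x) := by
  have hne : x ≠ 0 := by omega
  have h1 := PySem.Int.two_pow_bitLength_le x hne
  have h2 := PySem.Int.lt_two_pow_bitLength x
  have hab : x.natAbs = x.toNat := by omega
  have hcast : (x.natAbs : Int) = x := Int.natAbs_of_nonneg (by omega)
  have hL : 1 ≤ PySem.Int.bitLength x := by
    by_contra h
    have : PySem.Int.bitLength x = 0 := by omega
    rw [this] at h2; simp at h2; omega
  refine ⟨hL, ?_, ?_⟩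
  · calc (2:Int)^(PySem.Int.bitLength x - 1) = ((2^(PySem.Int.bitLength x - 1) : Nat) : Int) := by push_cast; ring
    _ ≤ (x.natAbs : Int) := by exact_mod_cast h1
    _ = x := hcast
  · calc x = (x.natAbs : Int) := hcast.symm
    _ < ((2^(PySem.Int.bitLength x) : Nat) : Int) := by exact_mod_cast h2
    _ = 2^(PySem.Int.bitLength x) := by push_cast; ring

-- for positive x, x >> k = 1 at exactly one k: bit_length(x) - 1
theorem shr_eq_one_iff (x : Int) (hx : 0 < x) (k : Nat) :
    x >>> k = 1 ↔ k = PySem.Int.bitLength x - 1 := by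
  rw [shr_eq_one_bracket]
  obtain ⟨h3, h1, h2⟩ := bitLen_bracket x hx
  constructor
  · rintro ⟨hl, hr⟩
    by_contra hne
    rcases Nat.lt_or_ge k (PySem.Int.bitLength x - 1) with h | h
    · have : (2:Int)^(k+1) ≤ 2^(PySem.Int.bitLength x - 1) :=
        pow_le_pow_right₀ (by norm_num) (by omega)
      linarith
    · have : (2:Int)^(PySem.Int.bitLength x) ≤ 2^k :=
        pow_le_pow_right₀ (by norm_num) (by omega)
      linarith
  · rintro rfl
    exact ⟨h1, by rwa [Nat.sub_add_cancel h3]⟩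

-- bound: a positive x below 2^m has bit_length ≤ m
theorem bitLen_le (x : Int) (hx : 0 < x) (m : Nat) (hb : x < 2^m) : PySem.Int.bitLength x ≤ m := by
  obtain ⟨h3, h1, _⟩ := bitLen_bracket x hx
  by_contra h
  have : (2:Int)^m ≤ 2^(PySem.Int.bitLength x - 1) := pow_le_pow_right₀ (by norm_num) (by omega)
  linarith

-- ===== VERDICT (by name: the statement is the Claim_ definition above) =====
theorem possiblePair_spec : Claim_equal_possiblePair := by
  intro and_ sum_ hdom
  unfold Spec_possiblePair possiblePair possiblePair_alt
  simp only [Dom_possiblePair, pvDomInt, Bool.and_eq_true, decide_eq_true_eq] at hdom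
  set or_ := sum_ - and_ with hor
  by_cases hneg : or_ < 0
  · simp [hneg]
  · simp only [hneg, if_false]
    have hor0 : 0 ≤ or_ := by omega
    -- reduce to: any = (or_>0 && and_>0 && bitLength eq)
    have key : (List.range MaxBit).any (fun k => (or_ >>> k == 1) && (and_ >>> k == 1)) =
        (decide (or_ > 0) && decide (and_ > 0) &&
          (PySem.Int.bitLength or_ == PySem.Int.bitLength and_)) := by
      rcases lt_or_eq_of_le hor0 with hpos | hzero
      · by_cases hand : 0 < and_
        · have hbound : or_ < 2^33 := by omega
          have hLor := bitLen_le or_ hpos 33 hbound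
          have hLand : PySem.Int.bitLength and_ ≤ 33 :=
            bitLen_le and_ hand 33 (by omega)
          obtain ⟨ho1, _, _⟩ := bitLen_bracket or_ hpos
          obtain ⟨ha1, _, _⟩ := bitLen_bracket and_ hand
          rcases Bool.eq_false_or_eq_true
              (PySem.Int.bitLength or_ == PySem.Int.bitLength and_) with heq | heq
          · -- equal bit lengths: k = bitLength - 1 < MaxBit fires
            rw [heq]
            replace heq := beq_iff_eq.mp heq
            simp [hpos, hand]
            exact ⟨PySem.Int.bitLength or_ - 1, by unfold MaxBit; omega,
              by rw [shr_eq_one_iff or_ hpos], by rw [shr_eq_one_iff and_ hand]; omega⟩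
          · -- bit lengths differ: no k fires
            rw [heq]
            replace heq := beq_eq_false_iff_ne.mp heq
            simp only [Bool.and_false, List.any_eq_false, Bool.and_eq_true, beq_iff_eq]
            rintro k hk ⟨hk1, hk2⟩
            rw [shr_eq_one_iff or_ hpos] at hk1
            rw [shr_eq_one_iff and_ hand] at hk2
            omega
        · -- and_ ≤ 0: its shift is never 1
          have : decide (and_ > 0) = false := by simp only [decide_eq_false_iff_not]; omega
          rw [this]
          simp only [Bool.and_false, Bool.false_and, List.any_eq_false, Bool.and_eq_true]
          rintro k hk ⟨_, hk2⟩
          rw [beq_iff_eq] at hk2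
          exact shr_nonpos and_ k (by omega) hk2
      · -- or_ = 0: its shift is never 1
        have : decide (or_ > 0) = false := by simp only [decide_eq_false_iff_not]; omega
        rw [this]
        simp only [Bool.false_and, List.any_eq_false, Bool.and_eq_true]
        rintro k hk ⟨hk1, _⟩
        rw [beq_iff_eq] at hk1
        exact shr_nonpos or_ k (by omega) hk1
    rw [key]
    cases h : (decide (or_ > 0) && decide (and_ > 0) &&
        (PySem.Int.bitLength or_ == PySem.Int.bitLength and_)) <;> simp
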